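-- pv_equiv track=rewrite | github.com/andrewharp/ComfyUI-EasyNodes | easy_nodes/llm_debugging.py | find_first_indented_line
-- ===== SOURCE A (Python) =====
-- def find_first_indented_line(the_source):
--     """
--     Finds the first indented line in the_source and returns a tuple containing
--     the character position of the start of the line and the indentation level.
--     """
--     char_location = 0
--     for line in the_source.split("\n"):
--         if line.strip() and not line.strip().startswith("#"):
--             indent_level = len(line) - len(line.lstrip())
--             if indent_level > 0:
--                 return (char_location, indent_level)
--         char_location += len(line) + 1
--     return None
-- ===== SOURCE B (Python) =====
-- def find_first_indented_line(the_source):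
--     """
--     Single character-level scan: no split(), no strip(), no per-line string
--     allocation. Walk the source once; for each line, step over its leading
--     whitespace, then decide directly from the first non-whitespace character.
--     """
--     s = the_source
--     n = len(s)
--     pos = 0
--     while True:
--         i = pos
--         while i < n and s[i] != "\n" and s[i].isspace():
--             i += 1
--         if i < n and s[i] != "\n" and s[i] != "#" and i > pos:
--             return (pos, i - pos)
--         while i < n and s[i] != "\n":
--             i += 1
--         if i == n:
--             return None
--         pos = i + 1
-- ===== Notes on version B (the rewrite author's own statement) =====
-- stated objective: alternative
-- what changed: Replaces A's split-into-lines loop with its per-line strip()/lstrip() calls (a line list plus three stripped strings per line) by a single character-level scan of the source that steps over each line's leading whitespace and decides from the first non-whitespace character.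
import Mathlib
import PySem

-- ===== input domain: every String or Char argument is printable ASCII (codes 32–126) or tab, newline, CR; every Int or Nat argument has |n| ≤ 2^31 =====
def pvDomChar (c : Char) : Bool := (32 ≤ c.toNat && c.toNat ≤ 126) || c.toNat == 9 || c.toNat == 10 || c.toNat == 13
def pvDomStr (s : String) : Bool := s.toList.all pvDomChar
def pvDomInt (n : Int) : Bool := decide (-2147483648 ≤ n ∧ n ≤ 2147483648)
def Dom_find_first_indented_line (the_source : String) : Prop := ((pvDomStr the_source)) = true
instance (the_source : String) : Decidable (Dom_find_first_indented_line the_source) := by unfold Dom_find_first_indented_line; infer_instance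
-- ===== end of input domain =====

-- B replaces A's split("\n")/strip()/lstrip() per-line loop by a single character-level
-- scan of the source with no per-line string allocation; objective: alternative.

-- ===== PORT A =====
-- the 'for line in the_source.split("\n")' loop with its running char_location
def aLoop : List (List Char) → Int → Option (Int × Int)
  | [], _ => none
  | line :: rest, pos =>
    if PySem.Chars.strip line ≠ [] ∧ PySem.Chars.startswith (PySem.Chars.strip line) ['#'] = false then
      if 0 < (line.length : Int) - ((PySem.Chars.lstrip line).length : Int) then
        some (pos, (line.length : Int) - ((PySem.Chars.lstrip line).length : Int))
      else aLoop rest (pos + line.length + 1)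
    else aLoop rest (pos + line.length + 1)

def find_first_indented_line (the_source : String) : Option (Int × Int) :=
  aLoop (PySem.Chars.splitOn the_source.toList ['\n']) 0

-- ===== PORT B =====
-- whitespace test of B's inner skip loop: s[i] != "\n" and s[i].isspace()
def altWs (c : Char) : Bool := c ≠ '\n' && PySem.Chars.isspace c

-- 'while i < n and s[i] != "\n" and s[i].isspace(): i += 1' — chars skipped so far and remainder
def altSkipWs : List Char → Nat → Nat × List Char
  | [], k => (k, [])
  | c :: rest, k => if altWs c then altSkipWs rest (k + 1) else (k, c :: rest)

-- 'while i < n and s[i] != "\n": i += 1' then 'pos = i + 1' — chars consumed through the newline, or none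
def altSkipLine : List Char → Nat → Option (Nat × List Char)
  | [], _ => none
  | c :: rest, m => if c = '\n' then some (m + 1, rest) else altSkipLine rest (m + 1)

theorem altSkipWs_snd_le : ∀ (l : List Char) (k : Nat), (altSkipWs l k).2.length ≤ l.length := by
  intro l
  induction l with
  | nil => intro k; simp [altSkipWs]
  | cons c rest ih =>
    intro k
    by_cases h : altWs c = true <;> simp [altSkipWs, h]
    exact le_trans (ih (k + 1)) (Nat.le_succ _)

theorem altSkipLine_lt : ∀ (l : List Char) (m m' : Nat) (b : List Char),
    altSkipLine l m = some (m', b) → b.length < l.length := by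
  intro l
  induction l with
  | nil => intro m m' b h; simp [altSkipLine] at h
  | cons c rest ih =>
    intro m m' b h
    by_cases hc : c = '\n'
    · simp [altSkipLine, hc] at h
      simp [← h.2]
    · simp [altSkipLine, hc] at h
      exact Nat.lt_succ_of_lt (ih _ _ _ h)

-- B's outer 'while True' loop; pos is the absolute char position of the current line start
def altLoop (l : List Char) (pos : Int) : Option (Int × Int) :=
  match _h : altSkipWs l 0 with
  | (_, []) => none
  | (k, c :: t) =>
    if c ≠ '\n' ∧ c ≠ '#' ∧ 0 < k then some (pos, (k : Int))
    else
      match _h2 : altSkipLine (c :: t) 0 with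
      | none => none
      | some (m, b) => altLoop b (pos + (k : Int) + (m : Int))
termination_by l.length
decreasing_by
  have h1 := altSkipWs_snd_le l 0
  rw [_h] at h1
  have h3 := altSkipLine_lt _ _ _ _ _h2
  simp at h1 h3 ⊢
  omega

def find_first_indented_line_alt (the_source : String) : Option (Int × Int) :=
  altLoop the_source.toList 0

-- ===== PRECONDITION & SPEC =====
def Spec_find_first_indented_line (the_source : String) (out : Option (Int × Int)) : Prop := out = find_first_indented_line_alt the_source
instance (the_source : String) (out : Option (Int × Int)) : Decidable (Spec_find_first_indented_line the_source out) := by unfold Spec_find_first_indented_line; infer_instance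

-- ===== CLAIM (what is proved, stated in full; the proofs are below) =====
def Claim_equal_find_first_indented_line : Prop := ∀ (the_source : String), Dom_find_first_indented_line the_source → Spec_find_first_indented_line the_source (find_first_indented_line the_source)

-- ===== LEMMAS AND PROOFS =====

-- Python's s.split("\n") as a structural recursion
def pyLines : List Char → List (List Char)
  | [] => [[]]
  | c :: rest =>
    if c = '\n' then [] :: pyLines rest
    else match pyLines rest with
      | [] => [[c]]
      | p :: ps => (c :: p) :: ps

def consHead (x : List Char) : List (List Char) → List (List Char)
  | [] => [x]
  | p :: ps => (x ++ p) :: ps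

theorem pyLines_ne_nil (l : List Char) : pyLines l ≠ [] := by
  cases l with
  | nil => simp [pyLines]
  | cons c rest =>
    by_cases h : c = '\n' <;> simp [pyLines, h]
    cases pyLines rest <;> simp

theorem splitOn_go_eq : ∀ (fuel : Nat) (l cur : List Char) (acc : List (List Char)),
    l.length < fuel →
    PySem.Chars.splitOn.go ['\n'] fuel l cur acc = acc.reverse ++ consHead cur.reverse (pyLines l) := by
  intro fuel
  induction fuel with
  | zero => intro l cur acc h; omega
  | succ f ih =>
    intro l cur acc h
    cases l with
    | nil => simp [PySem.Chars.splitOn.go, pyLines, consHead]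
    | cons c rest =>
      by_cases hc : c = '\n'
      · subst hc
        rw [PySem.Chars.splitOn.go]
        simp only [List.isPrefixOf, BEq.rfl, Bool.true_and, if_true, List.length_cons,
          List.drop_succ_cons, List.length_nil, List.drop_zero]
        rw [ih rest [] (cur.reverse :: acc) (by simpa using Nat.lt_of_succ_lt_succ h)]
        have h1 : pyLines ('\n' :: rest) = [] :: pyLines rest := by simp [pyLines]
        rw [h1]
        rcases h2 : pyLines rest with _ | ⟨p, ps⟩
        · exact absurd h2 (pyLines_ne_nil rest)
        · simp [consHead]
      · rw [PySem.Chars.splitOn.go]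
        have hpre : List.isPrefixOf ['\n'] (c :: rest) = false := by
          simp [List.isPrefixOf]
          intro hh; exact absurd hh.symm hc
        simp only [hpre, Bool.false_eq_true, if_false]
        rw [ih rest (c :: cur) acc (by simpa using Nat.lt_of_succ_lt_succ h)]
        have h1 : pyLines (c :: rest) = match pyLines rest with
          | [] => [[c]] | p :: ps => (c :: p) :: ps := by simp [pyLines, hc]
        rw [h1]
        rcases h2 : pyLines rest with _ | ⟨p, ps⟩
        · exact absurd h2 (pyLines_ne_nil rest)
        · simp [consHead]

theorem splitOn_eq_pyLines (l : List Char) : PySem.Chars.splitOn l ['\n'] = pyLines l := by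
  rw [PySem.Chars.splitOn, splitOn_go_eq (l.length + 1) l [] [] (Nat.lt_succ_self _)]
  rcases h2 : pyLines l with _ | ⟨p, ps⟩
  · exact absurd h2 (pyLines_ne_nil l)
  · simp [consHead]

theorem pyLines_no_nl (l : List Char) (h : '\n' ∉ l) : pyLines l = [l] := by
  induction l with
  | nil => simp [pyLines]
  | cons c rest ih =>
    simp at h
    rw [pyLines, if_neg (fun hh => h.1 hh.symm), ih h.2]

theorem pyLines_split (a b : List Char) (h : '\n' ∉ a) :
    pyLines (a ++ '\n' :: b) = a :: pyLines b := by
  induction a with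
  | nil => simp [pyLines]
  | cons c rest ih =>
    simp at h
    rw [List.cons_append, pyLines, if_neg (fun hh => h.1 hh.symm), ih h.2]

theorem altSkipWs_eq : ∀ (l : List Char) (k : Nat),
    altSkipWs l k = (k + (l.takeWhile altWs).length, l.dropWhile altWs) := by
  intro l
  induction l with
  | nil => intro k; simp [altSkipWs]
  | cons c rest ih =>
    intro k
    by_cases h : altWs c = true <;> simp [altSkipWs, h, ih]
    omega

theorem altSkipLine_none (l : List Char) (h : '\n' ∉ l) : ∀ m, altSkipLine l m = none := by
  induction l with
  | nil => intro m; simp [altSkipLine]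
  | cons c rest ih =>
    intro m
    simp at h
    rw [altSkipLine, if_neg (fun hh => h.1 hh.symm), ih h.2]

theorem altSkipLine_split (a b : List Char) (h : '\n' ∉ a) :
    ∀ m, altSkipLine (a ++ '\n' :: b) m = some (m + a.length + 1, b) := by
  induction a with
  | nil => intro m; simp [altSkipLine]
  | cons c rest ih =>
    intro m
    simp at h
    rw [List.cons_append, altSkipLine, if_neg (fun hh => h.1 hh.symm), ih h.2]
    simp; omega

theorem tw_dw_length (p : Char → Bool) (l : List Char) :
    (l.takeWhile p).length + (l.dropWhile p).length = l.length := by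
  induction l with
  | nil => simp
  | cons c rest ih =>
    by_cases h : p c = true
    · simp [h]; omega
    · simp [h]

-- on a newline-free list, altWs agrees with isspace
theorem dropWhile_altWs_no_nl (a : List Char) (h : '\n' ∉ a) :
    a.dropWhile altWs = a.dropWhile PySem.Chars.isspace := by
  induction a with
  | nil => simp
  | cons c rest ih =>
    simp at h
    have hne : c ≠ '\n' := fun hh => h.1 hh.symm
    have hc : altWs c = PySem.Chars.isspace c := by simp [altWs, hne]
    by_cases hs : PySem.Chars.isspace c = true <;>
      simp [hc, hs, ih h.2]

theorem rstrip_cons (c : Char) (cs : List Char) (hc : PySem.Chars.isspace c = false) :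
    PySem.Chars.rstrip (c :: cs) = c :: PySem.Chars.rstrip cs := by
  rw [PySem.Chars.rstrip, PySem.Chars.rstrip]
  rcases h : cs.reverse.dropWhile PySem.Chars.isspace with _ | ⟨d, ds⟩
  · simp [List.dropWhile_append, h, hc]
  · simp [List.dropWhile_append, h]

theorem strip_of_drop (a : List Char) (c : Char) (cs : List Char)
    (h : a.dropWhile PySem.Chars.isspace = c :: cs) :
    PySem.Chars.strip a = c :: PySem.Chars.rstrip cs := by
  have hc : PySem.Chars.isspace c = false := by
    have := List.dropWhile_get_zero_not (p := PySem.Chars.isspace) (l := a) (by simp [h])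
    simpa [h] using this
  rw [PySem.Chars.strip, PySem.Chars.lstrip, h, rstrip_cons c cs hc]

-- the verdict A and B both reach on one (newline-free) line
def lineVerdict (a : List Char) : Option Int :=
  match a.dropWhile PySem.Chars.isspace with
  | [] => none
  | c :: _ =>
    if c ≠ '#' ∧ 0 < (a.takeWhile PySem.Chars.isspace).length
    then some ((a.takeWhile PySem.Chars.isspace).length : Int) else none

theorem altLoop_nil_case (l : List Char) (pos : Int) (k : Nat)
    (heq : altSkipWs l 0 = (k, [])) : altLoop l pos = none := by
  rw [altLoop]
  split
  · rfl
  · next k' c' t' heq2 => rw [heq] at heq2; cases heq2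

theorem altLoop_cons_case (l : List Char) (pos : Int) (k : Nat) (c : Char) (t : List Char)
    (heq : altSkipWs l 0 = (k, c :: t)) :
    altLoop l pos = if c ≠ '\n' ∧ c ≠ '#' ∧ 0 < k then some (pos, (k : Int)) else
      match altSkipLine (c :: t) 0 with
      | none => none
      | some (m, b) => altLoop b (pos + (k : Int) + (m : Int)) := by
  rw [altLoop]
  split
  · next heq2 => rw [heq] at heq2; cases heq2
  · next k' c' t' heq2 =>
    rw [heq] at heq2
    injection heq2 with h1 h2
    injection h2 with h3 h4
    subst h1; subst h3; subst h4
    split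
    · rfl
    · split
      · next heq3 => rw [heq3]
      · next m b heq3 => rw [heq3]

theorem aLoop_line (a : List Char) (LS : List (List Char)) (pos : Int) :
    aLoop (a :: LS) pos =
      match lineVerdict a with
      | some k => some (pos, k)
      | none => aLoop LS (pos + (a.length : Int) + 1) := by
  rw [aLoop]
  rcases hr : a.dropWhile PySem.Chars.isspace with _ | ⟨c, cs⟩
  · have hstrip : PySem.Chars.strip a = [] := by
      rw [PySem.Chars.strip, PySem.Chars.lstrip, hr]
      simp [PySem.Chars.rstrip]
    simp [hstrip, lineVerdict, hr]
  · have hstrip := strip_of_drop a c cs hr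
    have hlen := tw_dw_length PySem.Chars.isspace a
    rw [hr] at hlen
    have hind : (a.length : Int) - ((PySem.Chars.lstrip a).length : Int)
        = ((a.takeWhile PySem.Chars.isspace).length : Int) := by
      rw [PySem.Chars.lstrip, hr]
      simp at hlen ⊢
      omega
    by_cases hc : c = '#'
    · simp [hstrip, lineVerdict, hr, hc, PySem.Chars.startswith, List.isPrefixOf]
    · by_cases hw : 0 < (a.takeWhile PySem.Chars.isspace).length
      · simp [hstrip, lineVerdict, hr, hc, hw, PySem.Chars.startswith, List.isPrefixOf, hind,
          Ne.symm hc]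
      · simp [hstrip, lineVerdict, hr, hc, hw, PySem.Chars.startswith, List.isPrefixOf, hind,
          Ne.symm hc]

theorem altLoop_mid (a b : List Char) (hna : '\n' ∉ a) (pos : Int) :
    altLoop (a ++ '\n' :: b) pos =
      match lineVerdict a with
      | some k => some (pos, k)
      | none => altLoop b (pos + (a.length : Int) + 1) := by
  have hws := altSkipWs_eq (a ++ '\n' :: b) 0
  have hdwa : a.dropWhile altWs = a.dropWhile PySem.Chars.isspace := dropWhile_altWs_no_nl a hna
  have hlenl := tw_dw_length altWs (a ++ '\n' :: b)
  rcases hr : a.dropWhile PySem.Chars.isspace with _ | ⟨c, cs⟩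
  · have hX : (a ++ '\n' :: b).dropWhile altWs = '\n' :: b := by
      rw [List.dropWhile_append]
      simp [hdwa, hr, altWs]
    rw [hX] at hlenl
    have hk : ((a ++ '\n' :: b).takeWhile altWs).length = a.length := by
      simp at hlenl; omega
    rw [altLoop_cons_case _ pos _ '\n' b (by rw [hws, hX, Nat.zero_add])]
    have hsl : altSkipLine ('\n' :: b) 0 = some (1, b) := by simp [altSkipLine]
    simp only [ne_eq, not_true_eq_false, false_and, if_false, hsl]
    simp [lineVerdict, hr, hk]
  · have hcmem : c ∈ a := (List.dropWhile_sublist (p := PySem.Chars.isspace) (l := a)).subset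
      (by rw [hr]; exact List.mem_cons_self)
    have hcsmem : ∀ x ∈ cs, x ∈ a := fun x hx =>
      (List.dropWhile_sublist (p := PySem.Chars.isspace) (l := a)).subset
        (by rw [hr]; exact List.mem_cons_of_mem _ hx)
    have hcne : c ≠ '\n' := fun hh => hna (hh ▸ hcmem)
    have hncs : '\n' ∉ (c :: cs) := by
      intro hm
      rcases List.mem_cons.mp hm with h1 | h1
      · exact hna (h1 ▸ hcmem)
      · exact hna (hcsmem _ h1)
    have hX : (a ++ '\n' :: b).dropWhile altWs = c :: (cs ++ '\n' :: b) := by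
      rw [List.dropWhile_append]
      simp [hdwa, hr]
    rw [hX] at hlenl
    have hlena := tw_dw_length PySem.Chars.isspace a
    rw [hr] at hlena
    have hk : ((a ++ '\n' :: b).takeWhile altWs).length
        = (a.takeWhile PySem.Chars.isspace).length := by
      simp at hlenl hlena ⊢; omega
    rw [altLoop_cons_case _ pos _ c (cs ++ '\n' :: b) (by rw [hws, hX, Nat.zero_add])]
    have hsl : altSkipLine (c :: (cs ++ '\n' :: b)) 0 = some (cs.length + 2, b) := by
      have := altSkipLine_split (c :: cs) b hncs 0
      simpa [Nat.add_comm, Nat.add_assoc, Nat.add_left_comm] using this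
    have harith : pos + ((((a ++ '\n' :: b).takeWhile altWs).length : Nat) : Int)
        + ((cs.length + 2 : Nat) : Int) = pos + (a.length : Int) + 1 := by
      simp at hlena
      rw [hk]; push_cast; omega
    by_cases hc : c = '#'
    · rw [if_neg (by simp [hc]), hsl]
      simp only [harith]
      simp [lineVerdict, hr, hc]
    · by_cases hw : 0 < (a.takeWhile PySem.Chars.isspace).length
      · rw [if_pos ⟨hcne, hc, by omega⟩]
        simp [lineVerdict, hr, hc, hw, hk]
      · rw [if_neg (by rw [hk]; tauto), hsl]
        simp only [harith]
        simp [lineVerdict, hr, hc, hw]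

theorem altLoop_last (a : List Char) (hna : '\n' ∉ a) (pos : Int) :
    altLoop a pos =
      match lineVerdict a with
      | some k => some (pos, k)
      | none => none := by
  have hws := altSkipWs_eq a 0
  have hdwa : a.dropWhile altWs = a.dropWhile PySem.Chars.isspace := dropWhile_altWs_no_nl a hna
  have hlena := tw_dw_length altWs a
  rcases hr : a.dropWhile PySem.Chars.isspace with _ | ⟨c, cs⟩
  · rw [altLoop_nil_case a pos _ (by rw [hws, hdwa, hr])]
    simp [lineVerdict, hr]
  · have hcmem : c ∈ a := (List.dropWhile_sublist (p := PySem.Chars.isspace) (l := a)).subset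
      (by rw [hr]; exact List.mem_cons_self)
    have hcsmem : ∀ x ∈ cs, x ∈ a := fun x hx =>
      (List.dropWhile_sublist (p := PySem.Chars.isspace) (l := a)).subset
        (by rw [hr]; exact List.mem_cons_of_mem _ hx)
    have hcne : c ≠ '\n' := fun hh => hna (hh ▸ hcmem)
    have hncs : '\n' ∉ (c :: cs) := by
      intro hm
      rcases List.mem_cons.mp hm with h1 | h1
      · exact hna (h1 ▸ hcmem)
      · exact hna (hcsmem _ h1)
    have hlena2 := tw_dw_length PySem.Chars.isspace a
    rw [hr] at hlena2
    rw [hdwa, hr] at hlena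
    have hk : (a.takeWhile altWs).length = (a.takeWhile PySem.Chars.isspace).length := by
      simp at hlena hlena2 ⊢; omega
    rw [altLoop_cons_case a pos _ c cs (by rw [hws, hdwa, hr, Nat.zero_add])]
    rw [altSkipLine_none (c :: cs) hncs 0]
    by_cases hc : c = '#'
    · simp [lineVerdict, hr, hc]
    · by_cases hw : 0 < (a.takeWhile PySem.Chars.isspace).length
      · rw [if_pos ⟨hcne, hc, by omega⟩]
        simp [lineVerdict, hr, hc, hw, hk]
      · rw [if_neg (by rw [hk]; tauto)]
        simp [lineVerdict, hr, hc, hw]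

theorem main_loop_eq : ∀ (n : Nat) (l : List Char), l.length ≤ n → ∀ (pos : Int),
    aLoop (pyLines l) pos = altLoop l pos := by
  intro n
  induction n with
  | zero =>
    intro l hl pos
    have h0 : l = [] := List.length_eq_zero_iff.mp (Nat.le_zero.mp hl)
    subst h0
    rw [altLoop_last [] (by simp) pos]
    simp [pyLines, aLoop_line, lineVerdict, aLoop]
  | succ n ih =>
    intro l hl pos
    rcases hd : l.dropWhile (fun c => c != '\n') with _ | ⟨c0, b⟩
    · have hsplit := (List.takeWhile_append_dropWhile (p := fun c => c != '\n') (l := l)).symm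
      rw [hd, List.append_nil] at hsplit
      have hna : '\n' ∉ l := by
        intro hm
        rw [hsplit] at hm
        have := List.mem_takeWhile_imp hm
        simp at this
      rw [pyLines_no_nl l hna, aLoop_line, altLoop_last l hna pos]
      cases lineVerdict l
      · simp [aLoop]
      · rfl
    · have hc0 : c0 = '\n' := by
        have := List.dropWhile_get_zero_not (p := fun c => c != '\n') (l := l) (by simp [hd])
        simpa [hd] using this
      subst hc0
      have hsplit := (List.takeWhile_append_dropWhile (p := fun c => c != '\n') (l := l)).symm
      rw [hd] at hsplit
      have hna : '\n' ∉ l.takeWhile (fun c => c != '\n') := by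
        intro hm
        have := List.mem_takeWhile_imp hm
        simp at this
      have hblen : b.length ≤ n := by
        have h2 := tw_dw_length (fun c => c != '\n') l
        rw [hd] at h2
        simp at h2
        omega
      rw [hsplit, pyLines_split _ b hna, aLoop_line, altLoop_mid _ b hna pos]
      cases lineVerdict (l.takeWhile (fun c => c != '\n'))
      · exact ih b hblen _
      · rfl

-- ===== VERDICT (by name: the statement is the Claim_ definition above) =====
theorem find_first_indented_line_spec : Claim_equal_find_first_indented_line := by
  intro s _
  unfold Spec_find_first_indented_line find_first_indented_line find_first_indented_line_alt
  rw [splitOn_eq_pyLines]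
  exact main_loop_eq s.toList.length s.toList le_rfl 0
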